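-- pv_equiv track=rewrite | github.com/qubasehq/LLMBuilder | llmbuilder/utils/workflow.py | _get_workflow_status
-- ===== SOURCE A (Python) =====
-- from typing import Dict, Any, List, Optional, Union
--
-- def _get_workflow_status(workflow_data: Dict[str, Any]) -> str:
--     """Determine the overall status of a workflow."""
--     steps = workflow_data["steps"]
--     if not steps:
--         return "empty"
--
--     if any(step["status"] == "failed" for step in steps):
--         return "failed"
--     elif any(step["status"] == "running" for step in steps):
--         return "running"
--     elif all(step["status"] == "completed" for step in steps):
--         return "completed"
--     else:
--         return "pending"
-- ===== SOURCE B (Python) =====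
-- def _get_workflow_status(workflow_data):
--     """Determine the overall status of a workflow."""
--     steps = workflow_data["steps"]
--     if not steps:
--         return "empty"
--
--     counts = {}
--     for step in steps:
--         s = step["status"]
--         if s == "failed":
--             return "failed"
--         counts[s] = counts.get(s, 0) + 1
--
--     if counts.get("running", 0):
--         return "running"
--     if counts.get("completed", 0) == len(steps):
--         return "completed"
--     return "pending"
-- ===== Notes on version B (the rewrite author's own statement) =====
-- stated objective: alternative
-- what changed: Replaces the two any-scans and one all-scan over the steps with a single pass that returns 'failed' as soon as it is seen and otherwise builds a status frequency table, then decides from O(1) count lookups in the same precedence order.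
import Mathlib
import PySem

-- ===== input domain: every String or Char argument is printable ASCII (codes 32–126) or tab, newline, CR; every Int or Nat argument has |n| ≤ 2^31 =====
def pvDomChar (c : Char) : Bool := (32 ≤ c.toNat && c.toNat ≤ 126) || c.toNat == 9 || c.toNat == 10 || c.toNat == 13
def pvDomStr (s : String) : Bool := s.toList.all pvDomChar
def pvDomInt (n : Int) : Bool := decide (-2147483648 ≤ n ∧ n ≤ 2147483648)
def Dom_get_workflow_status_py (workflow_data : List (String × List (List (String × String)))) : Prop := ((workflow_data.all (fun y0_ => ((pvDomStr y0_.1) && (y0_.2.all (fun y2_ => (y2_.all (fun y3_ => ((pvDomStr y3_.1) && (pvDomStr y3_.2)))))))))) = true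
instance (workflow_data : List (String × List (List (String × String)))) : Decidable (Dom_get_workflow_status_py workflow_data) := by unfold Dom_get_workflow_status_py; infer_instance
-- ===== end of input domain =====

-- B makes a single pass over the steps (returning "failed" as soon as it is seen,
-- otherwise building a status frequency table) and decides from count lookups,
-- instead of A's separate any/any/all scans. Same precedence order, same results.

-- ===== PORT A =====
def get_workflow_status_py (workflow_data : List (String × List (List (String × String)))) : String :=
  match (PySem.Dict.mk workflow_data).get? "steps" with
  | none => "KeyError"  -- unreachable under Pre_ (Python raises KeyError)
  | some steps =>
    if steps = [] then "empty"
    else if steps.any (fun step => (PySem.Dict.mk step).get? "status" == some "failed") then "failed"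
    else if steps.any (fun step => (PySem.Dict.mk step).get? "status" == some "running") then "running"
    else if steps.all (fun step => (PySem.Dict.mk step).get? "status" == some "completed") then "completed"
    else "pending"

-- ===== PORT B =====
-- B's counting loop with its early 'return "failed"': Sum.inl = early return, Sum.inr = the finished table
def pvLoopB : List (List (String × String)) → PySem.Dict String Int → Sum String (PySem.Dict String Int)
  | [], counts => .inr counts
  | step :: rest, counts =>
    let s := (PySem.Dict.mk step).getD "status" ""
    if s = "failed" then .inl "failed"
    else pvLoopB rest (counts.insert s (counts.getD s 0 + 1))

def get_workflow_status_py_alt (workflow_data : List (String × List (List (String × String)))) : String :=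
  match (PySem.Dict.mk workflow_data).get? "steps" with
  | none => "KeyError"  -- unreachable under Pre_ (Python raises KeyError)
  | some steps =>
    if steps = [] then "empty"
    else
      match pvLoopB steps PySem.Dict.empty with
      | .inl r => r
      | .inr counts =>
        if counts.getD "running" 0 ≠ 0 then "running"
        else if counts.getD "completed" 0 = (steps.length : Int) then "completed"
        else "pending"

-- ===== PRECONDITION & SPEC =====
-- Pre_ excludes exactly the inputs where Python A raises KeyError: no "steps" key, or a
-- step lacking a "status" key that the scan reaches before any step whose status is "failed".
def Pre_get_workflow_status_py (workflow_data : List (String × List (List (String × String)))) : Prop :=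
  ((PySem.Dict.mk workflow_data).get? "steps").isSome = true ∧
  ((∀ step ∈ ((PySem.Dict.mk workflow_data).get? "steps").getD [],
      ((PySem.Dict.mk step).get? "status").isSome = true) ∨
   (∃ step ∈ (((PySem.Dict.mk workflow_data).get? "steps").getD []).takeWhile
        (fun st => ((PySem.Dict.mk st).get? "status").isSome),
      (PySem.Dict.mk step).get? "status" = some "failed"))
instance (workflow_data : List (String × List (List (String × String)))) : Decidable (Pre_get_workflow_status_py workflow_data) := by unfold Pre_get_workflow_status_py; infer_instance

def pvWitness_get_workflow_status_py : (List (String × List (List (String × String)))) :=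
  [("steps", [[("status", "completed")], [("status", "pending")]])]

def Spec_get_workflow_status_py (workflow_data : List (String × List (List (String × String)))) (out : String) : Prop := out = get_workflow_status_py_alt workflow_data
instance (workflow_data : List (String × List (List (String × String)))) (out : String) : Decidable (Spec_get_workflow_status_py workflow_data out) := by unfold Spec_get_workflow_status_py; infer_instance

-- ===== CLAIM (what is proved, stated in full; the proofs are below) =====
def Claim_equal_get_workflow_status_py : Prop := ∀ (workflow_data : List (String × List (List (String × String)))), Dom_get_workflow_status_py workflow_data → Pre_get_workflow_status_py workflow_data → Spec_get_workflow_status_py workflow_data (get_workflow_status_py workflow_data)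

-- ===== LEMMAS AND PROOFS =====

-- the status of a step, as B's loop keys it ("" when the key is missing)
def pvStatus (step : List (String × String)) : String :=
  (PySem.Dict.mk step).getD "status" ""

lemma pvStatus_def (step : List (String × String)) :
    (PySem.Dict.mk step).getD "status" "" = pvStatus step := rfl

lemma status_eq_of_some {step : List (String × String)} {s : String}
    (h : (PySem.Dict.mk step).get? "status" = some s) : pvStatus step = s := by
  simp [pvStatus, PySem.Dict.getD_eq_get?_getD, h]

lemma status_failed_iff (step : List (String × String)) :
    pvStatus step = "failed" ↔ (PySem.Dict.mk step).get? "status" = some "failed" := by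
  cases h : (PySem.Dict.mk step).get? "status" with
  | none => simp [pvStatus, PySem.Dict.getD_eq_get?_getD, h]
  | some s => simp [status_eq_of_some h]

-- B's loop, no "failed" seen: it finishes with the insert-fold over the statuses
lemma pvLoopB_no_failed (steps : List (List (String × String)))
    (h : ∀ step ∈ steps, pvStatus step ≠ "failed") (c : PySem.Dict String Int) :
    pvLoopB steps c
      = .inr (steps.foldl (fun d step => d.insert (pvStatus step) (d.getD (pvStatus step) 0 + 1)) c) := by
  induction steps generalizing c with
  | nil => rfl
  | cons step rest ih =>
    have hne : pvStatus step ≠ "failed" := h step (by simp)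
    simp only [pvLoopB, List.foldl_cons, pvStatus_def]
    rw [if_neg hne]
    exact ih (fun s hs => h s (by simp [hs])) _

-- B's loop, a "failed" status is seen: early return
lemma pvLoopB_failed (steps : List (List (String × String)))
    (h : ∃ step ∈ steps, pvStatus step = "failed") (c : PySem.Dict String Int) :
    pvLoopB steps c = .inl "failed" := by
  induction steps generalizing c with
  | nil => simp at h
  | cons step rest ih =>
    simp only [pvLoopB, pvStatus_def]
    by_cases hs : pvStatus step = "failed"
    · rw [if_pos hs]
    · rw [if_neg hs]
      apply ih
      rcases h with ⟨st, hmem, hst⟩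
      rcases List.mem_cons.mp hmem with rfl | hmem'
      · exact absurd hst hs
      · exact ⟨st, hmem', hst⟩

-- B's finished fold is Counter over the mapped statuses
lemma counts_eq_counter (steps : List (List (String × String))) :
    steps.foldl
      (fun d step => d.insert (pvStatus step) (d.getD (pvStatus step) 0 + 1))
      PySem.Dict.empty
    = PySem.Dict.counter (steps.map pvStatus) := by
  rw [← PySem.Dict.foldl_insert_getD_add_one_eq_counter, List.foldl_map]

lemma any_iff_count (steps : List (List (String × String)))
    (h : ∀ step ∈ steps, ((PySem.Dict.mk step).get? "status").isSome = true) (v : String) :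
    (steps.any (fun step => (PySem.Dict.mk step).get? "status" == some v) = true)
    ↔ (steps.map pvStatus).count v ≠ 0 := by
  rw [List.any_eq_true]
  rw [Ne, List.count_eq_zero, not_not, List.mem_map]
  constructor
  · rintro ⟨step, hmem, hb⟩
    refine ⟨step, hmem, ?_⟩
    exact status_eq_of_some (by simpa using hb)
  · rintro ⟨step, hmem, hs⟩
    obtain ⟨s, hsome⟩ := Option.isSome_iff_exists.mp (h step hmem)
    have : s = v := by rw [← hs, status_eq_of_some hsome]
    exact ⟨step, hmem, by simp [hsome, this]⟩

lemma all_iff_count (steps : List (List (String × String)))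
    (h : ∀ step ∈ steps, ((PySem.Dict.mk step).get? "status").isSome = true) (v : String) :
    (steps.all (fun step => (PySem.Dict.mk step).get? "status" == some v) = true)
    ↔ (steps.map pvStatus).count v = (steps.map pvStatus).length := by
  rw [List.all_eq_true, List.count_eq_length]
  constructor
  · rintro hall s hs
    rw [List.mem_map] at hs
    obtain ⟨step, hmem, hst⟩ := hs
    have hb := hall step hmem
    exact (hst ▸ (status_eq_of_some (by simpa using hb))).symm
  · intro hall step hmem
    obtain ⟨s, hsome⟩ := Option.isSome_iff_exists.mp (h step hmem)
    have : v = s := by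
      rw [← status_eq_of_some hsome]
      exact hall (pvStatus step) (List.mem_map.mpr ⟨step, hmem, rfl⟩)
    simp [hsome, this]

-- ===== VERDICT (by name: the statement is the Claim_ definition above) =====
theorem get_workflow_status_py_spec : Claim_equal_get_workflow_status_py := by
  intro wd _ hpre
  obtain ⟨hsome, hrest⟩ := hpre
  obtain ⟨steps, hsteps⟩ := Option.isSome_iff_exists.mp hsome
  rw [hsteps] at hrest
  simp only [Option.getD_some] at hrest
  unfold Spec_get_workflow_status_py get_workflow_status_py get_workflow_status_py_alt
  rw [hsteps]
  by_cases hnil : steps = []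
  · simp [hnil]
  · simp only [if_neg hnil]
    by_cases hfail : ∃ step ∈ steps, pvStatus step = "failed"
    · -- A's first any-scan fires; B's loop returns early
      have hA : steps.any (fun step => (PySem.Dict.mk step).get? "status" == some "failed") = true := by
        rw [List.any_eq_true]
        obtain ⟨step, hmem, hst⟩ := hfail
        exact ⟨step, hmem, by simp [(status_failed_iff step).mp hst]⟩
      rw [if_pos hA, pvLoopB_failed steps hfail]
    · -- no "failed" status anywhere: every step has a status, and both sides decide from counts
      have hall : ∀ step ∈ steps, ((PySem.Dict.mk step).get? "status").isSome = true := by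
        rcases hrest with hall | ⟨step, hmem, hst⟩
        · exact hall
        · exact absurd ⟨step, (List.takeWhile_sublist _).subset hmem,
            (status_failed_iff step).mpr hst⟩ hfail
      have hA : ¬ steps.any (fun step => (PySem.Dict.mk step).get? "status" == some "failed") = true := by
        rw [List.any_eq_true]
        rintro ⟨step, hmem, hb⟩
        exact hfail ⟨step, hmem, (status_failed_iff step).mpr (by simpa using hb)⟩
      rw [if_neg hA,
          pvLoopB_no_failed steps (fun st hst h => hfail ⟨st, hst, h⟩) PySem.Dict.empty,
          counts_eq_counter]
      show _ = (if (PySem.Dict.counter (steps.map pvStatus)).getD "running" 0 ≠ 0 then "running"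
        else if (PySem.Dict.counter (steps.map pvStatus)).getD "completed" 0 = (steps.length : Int) then "completed"
        else "pending")
      have hcount : ∀ v, (PySem.Dict.counter (steps.map pvStatus)).getD v 0
          = ((steps.map pvStatus).count v : Int) := fun v => PySem.Dict.getD_counter _ _
      by_cases hr : steps.any (fun step => (PySem.Dict.mk step).get? "status" == some "running") = true
      · have hB : (PySem.Dict.counter (steps.map pvStatus)).getD "running" 0 ≠ 0 := by
          rw [hcount]; exact_mod_cast (any_iff_count steps hall "running").mp hr
        rw [if_pos hr, if_pos hB]
      · have hB : ¬ (PySem.Dict.counter (steps.map pvStatus)).getD "running" 0 ≠ 0 := by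
          rw [hcount]
          exact_mod_cast fun hc => hr ((any_iff_count steps hall "running").mpr (by exact_mod_cast hc))
        rw [if_neg hr, if_neg hB]
        by_cases hc : steps.all (fun step => (PySem.Dict.mk step).get? "status" == some "completed") = true
        · have hB : (PySem.Dict.counter (steps.map pvStatus)).getD "completed" 0 = (steps.length : Int) := by
            rw [hcount]
            have := (all_iff_count steps hall "completed").mp hc
            rw [List.length_map] at this
            exact_mod_cast this
          rw [if_pos hc, if_pos hB]
        · have hB : ¬ (PySem.Dict.counter (steps.map pvStatus)).getD "completed" 0 = (steps.length : Int) := by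
            rw [hcount]
            intro hgd
            apply hc
            apply (all_iff_count steps hall "completed").mpr
            rw [List.length_map]
            exact_mod_cast hgd
          rw [if_neg hc, if_neg hB]
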